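-- pv_equiv track=rewrite | github.com/jaredkoontz/leetcode_py | 0000_no_leet/test_breaking_bad.py | _breaking_bad_brute_force
-- ===== SOURCE A (Python) =====
-- def _breaking_bad_brute_force(phrase: str, symbols: list[str]) -> str:
--     # Sort elements by length in descending order
--     symbols.sort(key=lambda x: len(x), reverse=True)
--
--     words = phrase.split()
--     found_symbols = set()
--     result = []
--
--     for word in words:
--         original_word = word
--         for element in symbols:
--             word = word.replace(element, f"[{element}]")
--             if word != original_word:
--                 found_symbols.add(original_word)
--                 result.append(word)
--                 break
--         if original_word not in found_symbols:
--             result.append(original_word)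
--
--     return " ".join(result)
-- ===== SOURCE B (Python) =====
-- def _breaking_bad_brute_force(phrase: str, symbols: list[str]) -> str:
--     # Per word, pick the longest symbol occurring in it (first in list order on
--     # length ties) by a single max-selection scan -- no sorting of symbols and no
--     # mutation of the argument; the cheap length test guards the substring test.
--     def bracket(word: str) -> str:
--         best = None
--         for s in symbols:
--             if (best is None or len(s) > len(best)) and s in word:
--                 best = s
--         return word if best is None else word.replace(best, f"[{best}]")
--
--     return " ".join(bracket(w) for w in phrase.split())
-- ===== Notes on version B (the rewrite author's own statement) =====
-- stated objective: alternative
-- what changed: A sorts the symbol list by length (mutating it) and, per word, repeatedly rebuilds the word with str.replace until the first change, tracking matched words in a set; B never sorts and never mutates: per word it does one max-selection scan over the original symbol list (substring test, strictly-longer wins, first wins ties) and applies a single replace.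
import Mathlib
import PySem

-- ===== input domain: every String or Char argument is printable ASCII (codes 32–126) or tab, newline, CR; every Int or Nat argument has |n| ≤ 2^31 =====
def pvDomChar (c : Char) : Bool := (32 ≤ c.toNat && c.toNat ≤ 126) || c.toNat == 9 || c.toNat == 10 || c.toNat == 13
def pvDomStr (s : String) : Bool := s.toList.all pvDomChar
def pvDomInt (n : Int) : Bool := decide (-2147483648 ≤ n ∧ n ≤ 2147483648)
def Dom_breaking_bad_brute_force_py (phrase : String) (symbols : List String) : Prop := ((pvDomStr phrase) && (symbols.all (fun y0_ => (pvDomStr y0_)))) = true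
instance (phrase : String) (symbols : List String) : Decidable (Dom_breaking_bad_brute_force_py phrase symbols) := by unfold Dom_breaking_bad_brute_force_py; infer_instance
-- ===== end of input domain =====

-- B replaces A's sort-then-break-at-first-match scan by a sort-free single max-selection
-- pass per word (objective: alternative); the equivalence is about the RETURN value only —
-- A sorts `symbols` in place, B does not mutate it.

-- ===== PORT A =====
-- inner loop: 'for element in symbols: word = word.replace(element, f"[{element}]"); if word != original_word: …; break'
def bbInnerA (original : String) : List String → String → PySem.Set String → List String → PySem.Set String × List String
  | [], _word, found, result => (found, result)
  | element :: rest, word, found, result =>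
    let word' := PySem.Str.replace word element ("[" ++ element ++ "]")
    if word' ≠ original then (PySem.Set.add found original, result ++ [word'])
    else bbInnerA original rest word' found result

-- outer loop: 'for word in words: … ; if original_word not in found_symbols: result.append(original_word)'
def bbOuterA (symbolsSorted : List String) : List String → PySem.Set String → List String → List String
  | [], _found, result => result
  | word :: ws, found, result =>
    let fr := bbInnerA word symbolsSorted word found result
    let result' := if PySem.Set.contains fr.1 word = false then fr.2 ++ [word] else fr.2
    bbOuterA symbolsSorted ws fr.1 result'

def breaking_bad_brute_force_py (phrase : String) (symbols : List String) : String :=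
  let symbolsSorted := PySem.List.sorted symbols (fun x => PySem.Str.len x) true
  let words := PySem.Str.split₀ phrase
  PySem.Str.join " " (bbOuterA symbolsSorted words PySem.Set.empty [])

-- ===== PORT B =====
-- 'for s in symbols: if (best is None or len(s) > len(best)) and s in word: best = s'
def bbBestB (word : String) : List String → Option String → Option String
  | [], best => best
  | s :: rest, best =>
    let best' := if (match best with | none => true | some b => decide (PySem.Str.len b < PySem.Str.len s))
        && PySem.Str.isIn s word
      then some s else best
    bbBestB word rest best'

def bbBracketB (symbols : List String) (word : String) : String :=
  match bbBestB word symbols none with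
  | none => word
  | some s => PySem.Str.replace word s ("[" ++ s ++ "]")

def breaking_bad_brute_force_py_alt (phrase : String) (symbols : List String) : String :=
  PySem.Str.join " " ((PySem.Str.split₀ phrase).map (bbBracketB symbols))

-- ===== PRECONDITION & SPEC =====
def Spec_breaking_bad_brute_force_py (phrase : String) (symbols : List String) (out : String) : Prop := out = breaking_bad_brute_force_py_alt phrase symbols
instance (phrase : String) (symbols : List String) (out : String) : Decidable (Spec_breaking_bad_brute_force_py phrase symbols out) := by unfold Spec_breaking_bad_brute_force_py; infer_instance

-- ===== CLAIM (what is proved, stated in full; the proofs are below) =====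
def Claim_equal_breaking_bad_brute_force_py : Prop := ∀ (phrase : String) (symbols : List String), Dom_breaking_bad_brute_force_py phrase symbols → Spec_breaking_bad_brute_force_py phrase symbols (breaking_bad_brute_force_py phrase symbols)

-- ===== LEMMAS AND PROOFS =====

-- facts about PySem.Chars.replace.go: lower length bound, strict growth on an occurrence,
-- identity when the pattern does not occur
lemma go_len_ge (old new : List Char) (hold : old ≠ []) (hlen : old.length ≤ new.length) :
    ∀ (fuel : Nat) (l acc : List Char), l.length ≤ fuel →
    acc.length + l.length ≤ (PySem.Chars.replace.go old new fuel l acc).length := by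
  have hb : 0 < old.length := List.length_pos_iff.mpr hold
  intro fuel
  induction fuel with
  | zero => intro l acc h; rw [PySem.Chars.replace.go]; simp
  | succ n ih =>
    intro l acc h
    match l with
    | [] =>
      rw [PySem.Chars.replace.go]
      · simp
      · omega
    | c :: t =>
      rw [PySem.Chars.replace.go]
      split
      · rename_i hp
        have hpl : old <+: (c :: t) := List.isPrefixOf_iff_prefix.mp hp
        have h1 : old.length ≤ (c :: t).length := hpl.length_le
        have h2 := ih (List.drop old.length (c :: t)) (new.reverse ++ acc)
          (by simp; simp at h; omega)
        simp only [List.length_append, List.length_reverse, List.length_drop,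
          List.length_cons] at h2 ⊢
        simp at h
        omega
      · have h2 := ih t (c :: acc) (by simp at h ⊢; omega)
        simp only [List.length_cons] at h2 ⊢
        omega

lemma go_len_gt (old new : List Char) (hold : old ≠ []) (hlen : old.length < new.length) :
    ∀ (fuel : Nat) (l acc : List Char), l.length ≤ fuel → old <:+: l →
    acc.length + l.length < (PySem.Chars.replace.go old new fuel l acc).length := by
  have hb : 0 < old.length := List.length_pos_iff.mpr hold
  intro fuel
  induction fuel with
  | zero =>
    intro l acc h hin
    have hl : l = [] := List.length_eq_zero_iff.mp (Nat.le_zero.mp h)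
    subst hl
    exact absurd (List.eq_nil_of_infix_nil hin) hold
  | succ n ih =>
    intro l acc h hin
    match l with
    | [] => exact absurd (List.eq_nil_of_infix_nil hin) hold
    | c :: t =>
      rw [PySem.Chars.replace.go]
      split
      · rename_i hp
        have hpl : old <+: (c :: t) := List.isPrefixOf_iff_prefix.mp hp
        have h1 : old.length ≤ (c :: t).length := hpl.length_le
        have h2 := go_len_ge old new hold (by omega) n
          (List.drop old.length (c :: t)) (new.reverse ++ acc) (by simp; simp at h; omega)
        simp only [List.length_append, List.length_reverse, List.length_drop,
          List.length_cons] at h2 ⊢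
        simp at h
        omega
      · rename_i hp
        have hnt : old <:+: t := by
          rcases List.infix_cons_iff.mp hin with h' | h'
          · exact absurd (List.isPrefixOf_iff_prefix.mpr h') hp
          · exact h'
        have h2 := ih t (c :: acc) (by simp at h ⊢; omega) hnt
        simp only [List.length_cons] at h2 ⊢
        omega

lemma go_id (old new : List Char) :
    ∀ (fuel : Nat) (l acc : List Char), l.length ≤ fuel → ¬ old <:+: l →
    PySem.Chars.replace.go old new fuel l acc = acc.reverse ++ l := by
  intro fuel
  induction fuel with
  | zero => intro l acc h _; rw [PySem.Chars.replace.go]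
  | succ n ih =>
    intro l acc h hnin
    match l with
    | [] =>
      rw [PySem.Chars.replace.go]
      · simp
      · omega
    | c :: t =>
      rw [PySem.Chars.replace.go]
      split
      · rename_i hp
        exact absurd ((List.isPrefixOf_iff_prefix.mp hp).isInfix) hnin
      · have h2 := ih t (c :: acc) (by simp at h ⊢; omega)
          (fun h' => hnin (List.infix_cons_iff.mpr (Or.inr h')))
        simp [h2]

-- the empty pattern: replace always inserts brackets, so the word changes
lemma flatMap_len_gt (n : List Char) (hn : 0 < n.length) :
    ∀ (w : List Char), w.length < (n ++ w.flatMap (fun c => c :: n)).length := by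
  intro w
  induction w with
  | nil => simpa using hn
  | cons c t ih => simp at ih ⊢; omega

-- A's match test 'word.replace(e, "["+e+"]") != word' is exactly B's test 'e in word'
lemma replace_eq_self_iff (w e : String) :
    (PySem.Str.replace w e ("[" ++ e ++ "]") = w) ↔ PySem.Str.isIn e w = false := by
  have hlist : (("[" ++ e ++ "]" : String)).toList = '[' :: (e.toList ++ [']']) := by simp
  constructor
  · intro h
    by_contra hne
    have hbt : PySem.Str.isIn e w = true := Bool.ne_false_iff.mp hne
    have hin : e.toList <:+: w.toList := (PySem.Str.isIn_iff_infix e w).mp hbt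
    have hlen : (PySem.Str.replace w e ("[" ++ e ++ "]")).toList.length = w.toList.length := by
      rw [h]
    rw [PySem.Str.toList_replace, hlist] at hlen
    by_cases he : e.toList = []
    · rw [PySem.Chars.replace, if_pos (by simp [he])] at hlen
      have := flatMap_len_gt ('[' :: (e.toList ++ [']'])) (by simp) w.toList
      omega
    · rw [PySem.Chars.replace, if_neg (by simp [he])] at hlen
      have h2 := go_len_gt e.toList ('[' :: (e.toList ++ [']'])) he (by simp)
        w.toList.length w.toList [] (le_refl _) hin
      simp only [List.length_nil, Nat.zero_add] at h2
      omega
  · intro h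
    have hnin : ¬ e.toList <:+: w.toList := by
      intro h'
      rw [(PySem.Str.isIn_iff_infix e w).mpr h'] at h
      simp at h
    have he : e.toList ≠ [] := by
      intro h'
      exact hnin (h' ▸ List.nil_infix)
    have h2 : (PySem.Str.replace w e ("[" ++ e ++ "]")).toList = w.toList := by
      rw [PySem.Str.toList_replace, hlist, PySem.Chars.replace, if_neg (by simp [he])]
      simpa using go_id e.toList ('[' :: (e.toList ++ [']'])) w.toList.length w.toList []
        (le_refl _) hnin
    exact String.toList_injective h2

-- A's inner loop, characterised as a first-match search
def aTry (w : String) : List String → Option String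
  | [] => none
  | e :: rest =>
    let w' := PySem.Str.replace w e ("[" ++ e ++ "]")
    if w' ≠ w then some w' else aTry w rest

def aWord (symsS : List String) (w : String) : String := (aTry w symsS).getD w

lemma bbInnerA_eq (w : String) (syms : List String) :
    ∀ (found : PySem.Set String) (result : List String),
    bbInnerA w syms w found result =
      match aTry w syms with
      | none => (found, result)
      | some r => (PySem.Set.add found w, result ++ [r]) := by
  induction syms with
  | nil => intro found result; rfl
  | cons e rest ih =>
    intro found result
    by_cases hc : PySem.Str.replace w e ("[" ++ e ++ "]") ≠ w
    · simp only [bbInnerA, aTry, if_pos hc]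
    · simp only [bbInnerA, aTry, if_neg hc]
      rw [not_not] at hc
      rw [hc, ih]

lemma bbOuterA_eq (symsS : List String) :
    ∀ (ws : List String) (found : PySem.Set String) (result : List String),
    (∀ u ∈ found, aTry u symsS ≠ none) →
    bbOuterA symsS ws found result = result ++ ws.map (aWord symsS) := by
  intro ws
  induction ws with
  | nil => intro found result _; simp [bbOuterA]
  | cons w ws ih =>
    intro found result hinv
    simp only [bbOuterA, bbInnerA_eq]
    cases h : aTry w symsS with
    | none =>
      have hc : PySem.Set.contains found w = false := by
        cases hb : PySem.Set.contains found w
        · rfl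
        · exact absurd h (hinv w (List.contains_iff_mem.mp hb))
      rw [if_pos hc, ih found (result ++ [w]) hinv]
      simp [aWord, h]
    | some r =>
      have hc : PySem.Set.contains (PySem.Set.add found w) w = true :=
        List.contains_iff_mem.mpr ((PySem.Set.mem_add found w w).mpr (Or.inr rfl))
      rw [if_neg (by rw [hc]; simp), ih (PySem.Set.add found w) (result ++ [r]) ?_]
      · simp [aWord, h]
      · intro u hu
        rcases (PySem.Set.mem_add found w u).mp hu with h' | h'
        · exact hinv u h'
        · subst h'; simp [h]

-- aTry is find? of the occurrence test, mapped through the bracketing replace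
lemma aTry_eq_find? (w : String) (syms : List String) :
    aTry w syms = (syms.find? (fun e => PySem.Str.isIn e w)).map
      (fun e => PySem.Str.replace w e ("[" ++ e ++ "]")) := by
  induction syms with
  | nil => rfl
  | cons e rest ih =>
    simp only [aTry]
    by_cases h : PySem.Str.replace w e ("[" ++ e ++ "]") = w
    · have hb : PySem.Str.isIn e w = false := (replace_eq_self_iff w e).mp h
      rw [if_neg (fun hne => hne h), List.find?_cons_of_neg (by simp only [PySem.Str.isIn] at hb; simp [hb])]
      exact ih
    · have hb : PySem.Str.isIn e w = true := by
        cases hbb : PySem.Str.isIn e w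
        · exact absurd ((replace_eq_self_iff w e).mpr hbb) h
        · rfl
      rw [if_pos h, List.find?_cons_of_pos (by simp only [PySem.Str.isIn] at hb; simp [hb])]
      rfl

-- B's selection step, as a function of the accumulator
def stepB (w : String) (best : Option String) (x : String) : Option String :=
  if (match best with | none => true | some b => decide (PySem.Str.len b < PySem.Str.len x))
      && PySem.Str.isIn x w
    then some x else best

lemma bbBestB_append (w : String) (xs : List String) (x : String) :
    ∀ (b : Option String), bbBestB w (xs ++ [x]) b = stepB w (bbBestB w xs b) x := by
  induction xs with
  | nil => intro b; rfl
  | cons e rest ih => intro b; simp only [List.cons_append, bbBestB]; exact ih _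

-- inserting x into a length-descending list commutes with find? via stepB
lemma find?_insertBy (w x : String) :
    ∀ (L : List String), L.Pairwise (fun a b => PySem.Str.len b ≤ PySem.Str.len a) →
    (PySem.List.insertBy (fun a b => decide (PySem.Str.len b < PySem.Str.len a)) x L).find?
        (fun e => PySem.Str.isIn e w) =
      stepB w (L.find? (fun e => PySem.Str.isIn e w)) x := by
  intro L
  induction L with
  | nil =>
    intro _
    simp only [PySem.List.insertBy, List.find?_nil, stepB, List.find?_cons]
    cases hx : PySem.Str.isIn x w <;> simp
  | cons y t ih =>
    intro hp
    rcases List.pairwise_cons.mp hp with ⟨hy, ht⟩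
    rw [PySem.List.insertBy]
    split
    · rename_i hb
      have hyx : PySem.Str.len y < PySem.Str.len x := of_decide_eq_true hb
      cases hx : PySem.Str.isIn x w
      all_goals simp only [PySem.Str.isIn] at hx
      · cases hf : List.find? (fun e => PySem.Str.isIn e w) (y :: t) <;>
          · simp only [PySem.Str.isIn, List.find?_cons] at hf
            simp [stepB, List.find?_cons, PySem.Str.isIn, hx, hf]
      · cases hf : List.find? (fun e => PySem.Str.isIn e w) (y :: t) with
        | none =>
          simp only [PySem.Str.isIn, List.find?_cons] at hf
          simp [stepB, List.find?_cons, PySem.Str.isIn, hx, hf]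
        | some b =>
          have hbm := List.mem_of_find?_eq_some hf
          have hble : PySem.Str.len b ≤ PySem.Str.len y := by
            rcases List.mem_cons.mp hbm with hbm' | hbm'
            · exact hbm' ▸ le_refl _
            · exact hy b hbm'
          simp only [PySem.Str.isIn, List.find?_cons] at hf
          simp [stepB, List.find?_cons, PySem.Str.isIn, hx, hf]
          intro hle
          exfalso
          have hlt := lt_of_le_of_lt hble hyx
          simp [PySem.Str.len_eq] at hlt
          omega
    · rename_i hb
      have hnyx : ¬ PySem.Str.len y < PySem.Str.len x := by
        intro h'; exact hb (decide_eq_true h')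
      cases hyw : PySem.Str.isIn y w
      all_goals simp only [PySem.Str.isIn] at hyw
      · rw [List.find?_cons_of_neg (by simp [PySem.Str.isIn, hyw]),
          List.find?_cons_of_neg (by simp [PySem.Str.isIn, hyw])]
        exact ih ht
      · rw [List.find?_cons_of_pos (by simp [PySem.Str.isIn, hyw]),
          List.find?_cons_of_pos (by simp [PySem.Str.isIn, hyw])]
        simp [stepB]
        intro hlt _
        exfalso
        apply hnyx
        simp only [PySem.Str.len_eq, String.length_toList]
        exact_mod_cast hlt

-- the heart: first match in the length-descending sort = strict max-selection over the original list
lemma find?_sorted_eq_best (w : String) (syms : List String) :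
    (PySem.List.sorted syms (fun x => PySem.Str.len x) true).find? (fun e => PySem.Str.isIn e w)
      = bbBestB w syms none := by
  induction syms using List.reverseRecOn with
  | nil => rfl
  | append_singleton xs x ih =>
    have hs : ∀ (l : List String), PySem.List.sorted l (fun x => PySem.Str.len x) true =
        List.foldl (fun acc y => PySem.List.insertBy
          (fun a b => decide (PySem.Str.len b < PySem.Str.len a)) y acc) [] l :=
      fun l => PySem.List.sorted_rev_eq_foldl_insertBy l _
    rw [hs, List.foldl_append, List.foldl_cons, List.foldl_nil, ← hs, bbBestB_append,
      find?_insertBy w x _ (PySem.List.sorted_pairwise_rev xs _), ih]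

lemma perword (symbols : List String) (w : String) :
    aWord (PySem.List.sorted symbols (fun x => PySem.Str.len x) true) w
      = bbBracketB symbols w := by
  rw [aWord, aTry_eq_find?, find?_sorted_eq_best, bbBracketB]
  cases bbBestB w symbols none <;> rfl

-- ===== VERDICT (by name: the statement is the Claim_ definition above) =====
theorem breaking_bad_brute_force_py_spec : Claim_equal_breaking_bad_brute_force_py := by
  intro phrase symbols _
  unfold Spec_breaking_bad_brute_force_py
  show PySem.Str.join " " (bbOuterA (PySem.List.sorted symbols (fun x => PySem.Str.len x) true)
      (PySem.Str.split₀ phrase) PySem.Set.empty []) =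
    PySem.Str.join " " ((PySem.Str.split₀ phrase).map (bbBracketB symbols))
  rw [bbOuterA_eq _ _ PySem.Set.empty [] (by intro u hu; cases hu)]
  simp only [List.nil_append]
  congr 1
  exact List.map_congr_left (fun w _ => perword symbols w)
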